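-- pv_equiv track=rewrite | github.com/michael-hoss/perceptest | inputs/artery/from_logs/timestamps.py | _find_index_of_fuzzy_value
-- ===== SOURCE A (Python) =====
-- def _find_index_of_fuzzy_value(list: list[int], value: int, use_smaller: bool) -> int:
--     """Find the list index of the given value.
--     :param list: sorted list of integers.
--     :param value: value to search for. Can be outside of the list or between its elements.
--     :param use_smaller: if between two elements, return the smaller index (or the larger index if False).
--     :return: index. If value is outside of the list, return the closest index."""
--
--     if not list:
--         raise ValueError("List must not be empty")
--
--     try:
--         return list.index(value)
--     except ValueError:
--         for iter_index, iter_stamp in enumerate(list):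
--             if iter_stamp >= value:
--                 return max(iter_index - int(use_smaller), 0)
--         return len(list) - 1
-- ===== SOURCE B (Python) =====
-- def _find_index_of_fuzzy_value(list: list[int], value: int, use_smaller: bool) -> int:
--     """Rank every element by a lexicographic key (exact match < greater-or-equal <
--     smaller, then position) and take one min over the keyed enumeration; the winning
--     category decides exact vs fuzzy vs past-the-end.  No early exit, no staged scans."""
--     if not list:
--         raise ValueError("List must not be empty")
--     cat, pos = min(((0 if x == value else 1 if x >= value else 2), i)
--                    for i, x in enumerate(list))
--     if cat == 0:
--         return pos
--     if cat == 1: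
--         return max(pos - int(use_smaller), 0)
--     return len(list) - 1
-- ===== Notes on version B (the rewrite author's own statement) =====
-- stated objective: alternative
-- what changed: Replaces the staged try/except list.index lookup plus second early-exit scan with a single argmin reduction: every element is ranked by a lexicographic key (exact-match < greater-or-equal < smaller, then position) and one min over the keyed enumeration decides exact vs fuzzy vs past-the-end.
import Mathlib
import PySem

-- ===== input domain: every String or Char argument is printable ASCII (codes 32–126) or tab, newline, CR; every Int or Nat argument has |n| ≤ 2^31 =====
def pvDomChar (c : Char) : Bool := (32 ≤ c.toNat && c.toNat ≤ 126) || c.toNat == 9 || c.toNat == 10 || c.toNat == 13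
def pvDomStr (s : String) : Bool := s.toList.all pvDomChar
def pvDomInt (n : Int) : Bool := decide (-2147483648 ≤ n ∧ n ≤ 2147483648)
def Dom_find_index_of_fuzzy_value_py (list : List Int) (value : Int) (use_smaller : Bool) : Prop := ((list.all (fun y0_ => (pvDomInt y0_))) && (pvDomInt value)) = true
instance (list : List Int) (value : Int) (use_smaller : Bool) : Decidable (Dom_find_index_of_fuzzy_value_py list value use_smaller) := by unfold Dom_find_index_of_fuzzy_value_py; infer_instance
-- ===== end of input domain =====

-- B replaces A's staged try/except list.index lookup + second early-exit scan with one
-- argmin reduction over a lexicographically keyed enumeration (objective: alternative,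
-- same O(n) cost). Pre_ excludes only the empty list, on which A raises ValueError.

-- ===== PORT A =====
-- the `for iter_index, iter_stamp in enumerate(list)` fallback loop of A
def pvAFuzzy (l : List Int) (value : Int) (use_smaller : Bool) (i : Int) (lenm1 : Int) : Int :=
  match l with
  | [] => lenm1
  | x :: rest =>
      if x ≥ value then max (i - (if use_smaller then 1 else 0)) 0
      else pvAFuzzy rest value use_smaller (i + 1) lenm1

def find_index_of_fuzzy_value_py (list : List Int) (value : Int) (use_smaller : Bool) : Int :=
  -- empty-list guard (Python raises ValueError) is excluded by Pre_
  match PySem.List.index? list value with     -- try: return list.index(value)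
  | some i => (i : Int)
  | none => pvAFuzzy list value use_smaller 0 ((list.length : Int) - 1)   -- except ValueError: fallback loop

-- ===== PORT B =====
-- the per-element lexicographic key: 0 if x == value else 1 if x >= value else 2
def pvKey (v x : Int) : Int := if x = v then 0 else if x ≥ v then 1 else 2

-- Python's min over the keyed enumeration: the first key is the initial best, then a
-- left fold keeps the current best unless a strictly lex-smaller key appears
def pvMinFold (l : List Int) (v : Int) (j : Int) (best : Int × Int) : Int × Int :=
  match l with
  | [] => best
  | x :: rest =>
      pvMinFold rest v (j + 1)
        (if pvKey v x < best.1 ∨ (pvKey v x = best.1 ∧ j < best.2) then (pvKey v x, j) else best)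

def find_index_of_fuzzy_value_py_alt (list : List Int) (value : Int) (use_smaller : Bool) : Int :=
  match list with
  | [] => -1       -- empty-list guard (Python raises ValueError), excluded by Pre_
  | x :: rest =>
      let best := pvMinFold rest value 1 (pvKey value x, 0)
      if best.1 = 0 then best.2
      else if best.1 = 1 then max (best.2 - (if use_smaller then 1 else 0)) 0
      else (list.length : Int) - 1

-- ===== PRECONDITION & SPEC =====
-- Pre_ excludes exactly the empty list, on which A raises ValueError.
def Pre_find_index_of_fuzzy_value_py (list : List Int) (value : Int) (use_smaller : Bool) : Prop := list ≠ []
instance (list : List Int) (value : Int) (use_smaller : Bool) : Decidable (Pre_find_index_of_fuzzy_value_py list value use_smaller) := by unfold Pre_find_index_of_fuzzy_value_py; infer_instance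
def pvWitness_find_index_of_fuzzy_value_py : List Int × Int × Bool := ([1, 3, 3, 7], 5, true)

def Spec_find_index_of_fuzzy_value_py (list : List Int) (value : Int) (use_smaller : Bool) (out : Int) : Prop := out = find_index_of_fuzzy_value_py_alt list value use_smaller
instance (list : List Int) (value : Int) (use_smaller : Bool) (out : Int) : Decidable (Spec_find_index_of_fuzzy_value_py list value use_smaller out) := by unfold Spec_find_index_of_fuzzy_value_py; infer_instance

-- ===== CLAIM (what is proved, stated in full; the proofs are below) =====
def Claim_equal_find_index_of_fuzzy_value_py : Prop := ∀ (list : List Int) (value : Int) (use_smaller : Bool), Dom_find_index_of_fuzzy_value_py list value use_smaller → Pre_find_index_of_fuzzy_value_py list value use_smaller → Spec_find_index_of_fuzzy_value_py list value use_smaller (find_index_of_fuzzy_value_py list value use_smaller)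

-- ===== LEMMAS AND PROOFS =====

-- keep-first lexicographic minimum of two (category, position) keys
def pvLexMin (b c : Int × Int) : Int × Int :=
  if c.1 < b.1 ∨ (c.1 = b.1 ∧ c.2 < b.2) then c else b

-- first index whose element is ≥ v (l.length if none)
def pvFge : List Int → Int → Nat
  | [], _ => 0
  | x :: r, v => if v ≤ x then 0 else pvFge r v + 1

-- the lex minimum of the keyed enumeration of l starting at offset j
def pvM (l : List Int) (v : Int) (j : Int) : Int × Int :=
  match PySem.List.index? l v with
  | some i => (0, j + (i : Int))
  | none => if pvFge l v < l.length then (1, j + (pvFge l v : Int)) else (2, j)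

theorem pvM_fst_bounds
 (l : List Int) (v : Int) (j : Int) :
    0 ≤ (pvM l v j).1 ∧ (pvM l v j).1 ≤ 2 := by
  unfold pvM
  cases PySem.List.index? l v with
  | some i => exact ⟨le_refl 0, by norm_num⟩
  | none => split_ifs <;> exact ⟨by norm_num, by norm_num⟩

theorem pvM_snd_ge (l : List Int) (v : Int) (j : Int) : j ≤ (pvM l v j).2 := by
  unfold pvM
  cases PySem.List.index? l v with
  | some i => simp
  | none => split_ifs <;> norm_num

theorem pvM_cons (x : Int) (r : List Int) (v : Int) (j : Int) :
    pvM (x :: r) v j = pvLexMin (pvKey v x, j) (pvM r v (j + 1)) := by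
  have hb := pvM_fst_bounds r v (j + 1)
  have hs := pvM_snd_ge r v (j + 1)
  rcases hm : pvM r v (j + 1) with ⟨m1, m2⟩
  rw [hm] at hb hs
  by_cases hx : x = v
  · subst hx
    have hL : pvM (x :: r) x j = (0, j) := by
      unfold pvM
      rw [PySem.List.index?_cons_self]
      norm_num
    have hk : pvKey x x = 0 := by simp [pvKey]
    rw [hL, hk, pvLexMin, if_neg (by simp; omega)]
  · have hk0 : pvKey v x = (if v ≤ x then 1 else 2) := by
      unfold pvKey
      rw [if_neg hx]
    have hk1 : (1 : Int) ≤ pvKey v x := by rw [hk0]; split <;> omega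
    cases hi : PySem.List.index? r v with
    | some i =>
        have hm' : m1 = 0 ∧ m2 = j + 1 + (i : Int) := by
          have h2 : pvM r v (j + 1) = (0, j + 1 + (i : Int)) := by unfold pvM; rw [hi]
          rw [hm, Prod.mk.injEq] at h2
          exact ⟨h2.1, h2.2⟩
        have hL : pvM (x :: r) v j = (0, j + 1 + (i : Int)) := by
          unfold pvM
          rw [PySem.List.index?_cons_of_ne r hx, hi]
          simp
          omega
        rw [hL, pvLexMin, if_pos (by simp; omega)]
        simp only [Prod.mk.injEq]
        exact ⟨hm'.1.symm, hm'.2.symm⟩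
    | none =>
        have hm' : m1 = (if pvFge r v < r.length then (1 : Int) else 2) ∧
                   m2 = (if pvFge r v < r.length then j + 1 + (pvFge r v : Int) else j + 1) := by
          have h2 : pvM r v (j + 1) = (if pvFge r v < r.length then ((1 : Int), j + 1 + (pvFge r v : Int)) else (2, j + 1)) := by
            unfold pvM
            rw [hi]
          rw [hm] at h2
          split_ifs at h2 <;> rw [Prod.mk.injEq] at h2 <;>
            (constructor <;> split_ifs <;> omega)
        by_cases hvx : v ≤ x
        · have hL : pvM (x :: r) v j = (1, j) := by
            unfold pvM
            rw [PySem.List.index?_cons_of_ne r hx, hi]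
            rw [show pvFge (x :: r) v = 0 by simp [pvFge, hvx]]
            simp
          rw [hL, pvLexMin, if_neg (by simp; rw [hk0, if_pos hvx]; split_ifs at hm' <;> omega)]
          rw [hk0, if_pos hvx]
        · have hxlt : ¬ (x ≥ v) := hvx
          by_cases hf : pvFge r v < r.length
          · have hL : pvM (x :: r) v j = (1, j + 1 + (pvFge r v : Int)) := by
              unfold pvM
              rw [PySem.List.index?_cons_of_ne r hx, hi]
              rw [show pvFge (x :: r) v = pvFge r v + 1 by simp [pvFge, hvx]]
              simp only [List.length_cons]
              rw [if_pos (by omega)]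
              simp
              ring
            rw [hL, pvLexMin, if_pos (by simp; rw [hk0, if_neg hvx]; split_ifs at hm' <;> omega)]
            simp only [Prod.mk.injEq]
            rw [if_pos hf] at hm'  -- no-op shape; keep components
            exact ⟨by omega, by omega⟩
          · have hL : pvM (x :: r) v j = (2, j) := by
              unfold pvM
              rw [PySem.List.index?_cons_of_ne r hx, hi]
              rw [show pvFge (x :: r) v = pvFge r v + 1 by simp [pvFge, hvx]]
              simp only [List.length_cons]
              rw [if_neg (by omega)]
              rfl
            rw [hL, pvLexMin, if_neg (by simp; rw [hk0, if_neg hvx]; split_ifs at hm' <;> omega)]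
            rw [hk0, if_neg hvx]

theorem pvLexMin_assoc (a b c : Int × Int) :
    pvLexMin (pvLexMin a b) c = pvLexMin a (pvLexMin b c) := by
  rcases a with ⟨a1, a2⟩
  rcases b with ⟨b1, b2⟩
  rcases c with ⟨c1, c2⟩
  simp only [pvLexMin]
  split_ifs <;> first | rfl | (exfalso; omega)

theorem pvMinFold_eq (l : List Int) (v : Int) :
    ∀ (j : Int) (best : Int × Int), best.1 ≤ 2 → best.2 < j →
      pvMinFold l v j best = pvLexMin best (pvM l v j) := by
  induction l with
  | nil =>
      intro j best h1 h2
      have hM : pvM [] v j = (2, j) := by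
        unfold pvM
        rw [(PySem.List.index?_eq_none_iff [] v).mpr (by simp)]
        norm_num [pvFge]
      rw [pvMinFold, hM, pvLexMin, if_neg (by simp; omega)]
  | cons x r ih =>
      intro j best h1 h2
      have hk2 : pvKey v x ≤ 2 := by unfold pvKey; split_ifs <;> omega
      have hb' : (if pvKey v x < best.1 ∨ (pvKey v x = best.1 ∧ j < best.2) then (pvKey v x, j) else best)
          = pvLexMin best (pvKey v x, j) := by
        rw [pvLexMin]
      rw [pvMinFold, hb', pvM_cons, ← pvLexMin_assoc]
      rcases hc : pvLexMin best (pvKey v x, j) with ⟨b1, b2⟩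
      have hcase : (b1, b2) = (pvKey v x, j) ∨ (b1, b2) = best := by
        rw [← hc, pvLexMin]
        split <;> simp
      refine ih (j + 1) (b1, b2) ?_ ?_
      · rcases hcase with h | h <;> rw [Prod.mk.injEq] at h <;> omega
      · rcases hcase with h | h <;> rw [Prod.mk.injEq] at h <;> omega

-- A's fallback loop in terms of pvFge
theorem pvAFuzzy_spec (l : List Int) (v : Int) (us : Bool) (lenm1 : Int) :
    ∀ i : Int, pvAFuzzy l v us i lenm1 =
      if pvFge l v < l.length then max ((i + (pvFge l v : Int)) - (if us then 1 else 0)) 0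
      else lenm1 := by
  induction l with
  | nil => intro i; simp [pvAFuzzy, pvFge]
  | cons x r ih =>
      intro i
      by_cases hx : v ≤ x
      · simp [pvAFuzzy, pvFge, hx]
      · have hx' : ¬ x ≥ v := by omega
        simp only [pvAFuzzy, pvFge, if_neg hx', ih (i + 1), List.length_cons]
        have : ((pvFge r v + 1 : Nat) : Int) = (pvFge r v : Int) + 1 := by push_cast; ring
        rw [this]
        split_ifs with h1 h2 h2 <;> omega

-- ===== VERDICT (by name: the statement is the Claim_ definition above) =====
theorem find_index_of_fuzzy_value_py_spec : Claim_equal_find_index_of_fuzzy_value_py := by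
  intro list value us _ hpre
  unfold Spec_find_index_of_fuzzy_value_py
  match list with
  | [] => exact absurd rfl hpre
  | x :: rest =>
      unfold find_index_of_fuzzy_value_py find_index_of_fuzzy_value_py_alt
      simp only []
      rw [pvMinFold_eq rest value 1 (pvKey value x, 0)
            (by unfold pvKey; split_ifs <;> omega) (by norm_num)]
      have hM := (pvM_cons x rest value 0).symm
      rw [show (0 : Int) + 1 = 1 from by norm_num] at hM
      rw [hM]
      unfold pvM
      cases hi : PySem.List.index? (x :: rest) value with
      | some i => simp
      | none =>
          rw [pvAFuzzy_spec]
          by_cases hf : pvFge (x :: rest) value < (x :: rest).length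
          · rw [if_pos hf, if_pos hf]
            norm_num
          · rw [if_neg hf, if_neg hf]
            norm_num
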